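-- pv_equiv track=rewrite | github.com/ggchappell/AdventOfCode2020 | day05/solve-05b.py | is_valid_bps
-- ===== SOURCE A (Python) =====
-- def is_valid_bps(bps):
--     if not isinstance(bps, str):
--         return False
--     if len(bps) != 10:
--         return False
--     for c in bps[0:7]:
--         if c != "F" and c != "B":
--             return False
--     for c in bps[7:]:
--         if c != "R" and  c != "L":
--             return False
--     return True
-- ===== SOURCE B (Python) =====
-- import re
--
-- _BPS_RE = re.compile(r"[FB]{7}[RL]{3}")
--
--
-- def is_valid_bps(bps):
--     if not isinstance(bps, str):
--         return False
--     return _BPS_RE.fullmatch(bps) is not None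
-- ===== Notes on version B (the rewrite author's own statement) =====
-- stated objective: idiomatic
-- what changed: The explicit length check and the two slice loops are replaced by a single compiled-regex fullmatch of [FB]{7}[RL]{3} (ported as a pattern-directed matcher that consumes 7 chars of class FB then 3 of class RL then requires end of input).
import Mathlib
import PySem

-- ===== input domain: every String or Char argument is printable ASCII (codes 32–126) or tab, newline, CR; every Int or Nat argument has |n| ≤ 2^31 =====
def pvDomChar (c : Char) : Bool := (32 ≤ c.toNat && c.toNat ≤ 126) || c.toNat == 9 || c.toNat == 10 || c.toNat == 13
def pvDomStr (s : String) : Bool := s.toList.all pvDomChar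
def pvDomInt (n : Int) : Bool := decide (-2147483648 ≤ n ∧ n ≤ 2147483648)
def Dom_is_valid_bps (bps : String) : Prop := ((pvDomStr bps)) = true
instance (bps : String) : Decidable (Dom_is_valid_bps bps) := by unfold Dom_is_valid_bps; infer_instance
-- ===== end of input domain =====

-- B replaces A's explicit length check and two slice loops by a single pattern-directed
-- matcher (Python: re.fullmatch of [FB]{7}[RL]{3}); more idiomatic, same behaviour.


-- ===== PORT A =====
-- for c in bps[0:7]: if c != "F" and c != "B": return False
def pvLoopFB : List Char → Bool
  | [] => true
  | c :: cs => if c != 'F' && c != 'B' then false else pvLoopFB cs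

-- for c in bps[7:]: if c != "R" and c != "L": return False
def pvLoopRL : List Char → Bool
  | [] => true
  | c :: cs => if c != 'R' && c != 'L' then false else pvLoopRL cs

def is_valid_bps (bps : String) : Bool :=
  if PySem.Str.len bps ≠ 10 then false
  else if pvLoopFB (PySem.List.slice bps.toList (some 0) (some 7)) = false then false
  else if pvLoopRL (PySem.List.slice bps.toList (some 7) none) = false then false
  else true

-- ===== PORT B =====
-- port of re.fullmatch(r"[FB]{7}[RL]{3}", bps): consume n chars of a class, return the rest
def pvMatchClass (ok : Char → Bool) : Nat → List Char → Option (List Char)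
  | 0, cs => some cs
  | _ + 1, [] => none
  | n + 1, c :: cs => if ok c then pvMatchClass ok n cs else none

def is_valid_bps_alt (bps : String) : Bool :=
  match pvMatchClass (fun c => c == 'F' || c == 'B') 7 bps.toList with
  | none => false
  | some rest =>
    match pvMatchClass (fun c => c == 'R' || c == 'L') 3 rest with
    | some [] => true
    | _ => false

-- ===== PRECONDITION & SPEC =====
def Spec_is_valid_bps (bps : String) (out : Bool) : Prop := out = is_valid_bps_alt bps
instance (bps : String) (out : Bool) : Decidable (Spec_is_valid_bps bps out) := by unfold Spec_is_valid_bps; infer_instance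

-- ===== CLAIM (what is proved, stated in full; the proofs are below) =====
def Claim_equal_is_valid_bps : Prop := ∀ (bps : String), Dom_is_valid_bps bps → Spec_is_valid_bps bps (is_valid_bps bps)

-- ===== LEMMAS AND PROOFS =====

theorem pvMatchClass_short (ok : Char → Bool) :
    ∀ (n : Nat) (l : List Char), l.length < n → pvMatchClass ok n l = none := by
  intro n
  induction n with
  | zero => intro l h; omega
  | succ n ih =>
    intro l h
    cases l with
    | nil => rfl
    | cons c cs =>
      simp only [pvMatchClass]
      split
      · exact ih cs (by simpa using Nat.lt_of_succ_lt_succ h)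
      · rfl

theorem pvMatchClass_long (ok : Char → Bool) :
    ∀ (n : Nat) (l : List Char), n ≤ l.length →
      pvMatchClass ok n l =
        if (l.take n).all ok then some (l.drop n) else none := by
  intro n
  induction n with
  | zero => intro l _; simp [pvMatchClass]
  | succ n ih =>
    intro l h
    cases l with
    | nil => simp at h
    | cons c cs =>
      simp only [pvMatchClass, List.take_succ_cons, List.all_cons, List.drop_succ_cons]
      by_cases hc : ok c
      · rw [ih cs (by simpa using Nat.lt_of_succ_le h)]
        simp [hc]
      · simp [hc]

theorem pvLoopFB_all (l : List Char) :
    pvLoopFB l = l.all (fun c => c == 'F' || c == 'B') := by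
  induction l with
  | nil => rfl
  | cons c cs ih =>
    simp only [pvLoopFB, List.all_cons, ← ih]
    by_cases h1 : c = 'F'
    · simp [h1]
    · by_cases h2 : c = 'B' <;> simp [h1, h2]

theorem pvLoopRL_all (l : List Char) :
    pvLoopRL l = l.all (fun c => c == 'R' || c == 'L') := by
  induction l with
  | nil => rfl
  | cons c cs ih =>
    simp only [pvLoopRL, List.all_cons, ← ih]
    by_cases h1 : c = 'R'
    · simp [h1]
    · by_cases h2 : c = 'L' <;> simp [h1, h2]

-- ===== VERDICT (by name: the statement is the Claim_ definition above) =====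
theorem is_valid_bps_spec : Claim_equal_is_valid_bps := by
  intro bps _
  unfold Spec_is_valid_bps is_valid_bps is_valid_bps_alt
  set l := bps.toList with hl
  have hlen : PySem.Str.len bps = (l.length : Int) := by
    simp [PySem.Str.len_eq, hl]
  by_cases h10 : l.length = 10
  · -- length 10: both reduce to the two 'all' checks
    rw [pvMatchClass_long _ 7 l (by omega)]
    have h7 : (l.drop 7).length = 3 := by simp [h10]
    rw [hlen, h10]
    rw [if_neg (show ¬ (((10:Nat) : Int) ≠ 10) by norm_num)]
    by_cases hFB : (l.take 7).all (fun c => c == 'F' || c == 'B')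
    · rw [if_pos hFB]
      dsimp only
      rw [pvMatchClass_long _ 3 (l.drop 7) (by omega)]
      have htake : (l.drop 7).take 3 = l.drop 7 := List.take_of_length_le (by omega)
      have hdrop : (l.drop 7).drop 3 = [] := by
        apply List.eq_nil_of_length_eq_zero; simp; omega
      rw [htake, hdrop]
      have hslice0 : PySem.List.slice l (some 0) (some 7) = l.take 7 := by
        simpa using PySem.List.slice_to_natCast (xs := l) (b := 7)
      have hslice7 : PySem.List.slice l (some 7) none = l.drop 7 := by
        simpa using PySem.List.slice_from_natCast (xs := l) (a := 7)
      rw [hslice0, hslice7, pvLoopFB_all, pvLoopRL_all, hFB]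
      by_cases hRL : (l.drop 7).all (fun c => c == 'R' || c == 'L')
      · simp [hRL]
      · simp only [hRL]
        simp
    · rw [if_neg hFB]
      have hslice0 : PySem.List.slice l (some 0) (some 7) = l.take 7 := by
        simpa using PySem.List.slice_to_natCast (xs := l) (b := 7)
      rw [hslice0, pvLoopFB_all]
      simp [hFB]
  · -- length ≠ 10: A is false by the guard; show B is false too
    rw [hlen]
    rw [if_pos (by exact_mod_cast h10)]
    by_cases hlt : l.length < 7
    · rw [pvMatchClass_short _ 7 l hlt]
    · rw [pvMatchClass_long _ 7 l (by omega)]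
      by_cases hFB : (l.take 7).all (fun c => c == 'F' || c == 'B')
      · rw [if_pos hFB]
        dsimp only
        have h7 : (l.drop 7).length = l.length - 7 := by simp
        by_cases hlt3 : (l.drop 7).length < 3
        · rw [pvMatchClass_short _ 3 _ hlt3]
        · rw [pvMatchClass_long _ 3 _ (by omega)]
          by_cases hRL : ((l.drop 7).take 3).all (fun c => c == 'R' || c == 'L')
          · rw [if_pos hRL]
            have : (l.drop 7).drop 3 ≠ [] := by
              intro hnil
              have := congrArg List.length hnil
              simp at this
              omega
            cases hne : (l.drop 7).drop 3 with
            | nil => exact absurd hne this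
            | cons a as => rfl
          · rw [if_neg hRL]
      · rw [if_neg hFB]
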